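-- pv_equiv track=rewrite | github.com/Martin-Seysen/mmgroup | src/mmgroup/bitfunctions.py | iter_ascending_bitweight
-- ===== SOURCE A (Python) =====
-- def iter_bitweight(k,n):
--     """Iterate through all integers 0 <= x < n with bit weight k"""
--     if k > 0:
--         x = (1 << k) - 1  # smallest integer of bit weight k
--         while x < n:
--             yield x
--             # use Gosper's hack to get next integer x of bit weight k
--             c = x & -x
--             r = x + c
--             x = (((x ^ r) >> 2) // c) | r
--     elif n > 0:
--         yield 0
--
-- def iter_ascending_bitweight(n):
--     """Iterate through all integers 0 <= x < n by ascending bit weight"""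
--     if n > 0:
--         yield 0
--         k = 1
--         while 1 << k <= n:
--             for y in iter_bitweight(k,n):
--                 yield y
--             k = k + 1
-- ===== SOURCE B (Python) =====
-- def iter_ascending_bitweight(n):
--     """Iterate through all integers 0 <= x < n by ascending bit weight."""
--     # One stable sort of range(n) by popcount replaces A's Gosper-hack walk:
--     # range(n) is ascending, so equal-weight integers keep numeric order.
--     yield from sorted(range(n), key=int.bit_count)
-- ===== Notes on version B (the rewrite author's own statement) =====
-- stated objective: simpler
-- what changed: Replaces the nested per-weight Gosper-hack enumeration with a single stable sort of range(n) keyed by int.bit_count (stability on the ascending range reproduces A's numeric order within each weight).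
import Mathlib
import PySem

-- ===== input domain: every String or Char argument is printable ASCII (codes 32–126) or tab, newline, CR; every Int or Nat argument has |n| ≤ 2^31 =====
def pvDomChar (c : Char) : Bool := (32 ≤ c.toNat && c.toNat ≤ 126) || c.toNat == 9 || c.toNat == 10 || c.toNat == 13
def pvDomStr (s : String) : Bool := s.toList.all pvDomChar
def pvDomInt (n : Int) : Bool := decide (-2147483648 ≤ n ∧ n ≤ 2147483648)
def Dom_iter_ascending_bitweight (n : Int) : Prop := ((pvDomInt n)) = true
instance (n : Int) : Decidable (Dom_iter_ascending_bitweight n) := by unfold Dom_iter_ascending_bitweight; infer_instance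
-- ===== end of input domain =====

-- B replaces A's Gosper-hack per-weight enumeration by one stable sort of range(n)
-- keyed by popcount (objective: simpler); both generators are compared as the lists they yield.


-- ===== PORT A =====
-- Gosper's hack body: c = x & -x; r = x + c; x = (((x ^ r) >> 2) // c) | r
def gstep (x : Int) : Int :=
  let c := PySem.Int.band x (-x)
  let r := x + c
  PySem.Int.bor (PySem.Int.floordiv ((PySem.Int.bxor x r) >>> (2 : Nat)) c) r

-- the 'while x < n' loop of iter_bitweight; fuel only makes the recursion structural
def gloop : Nat → Int → Int → List Int
  | 0, _, _ => []
  | fuel+1, x, n => if x < n then x :: gloop fuel (gstep x) n else []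

-- iter_bitweight(k, n); '1 << k' ported as 1 <<< k.toNat (exact for k ≥ 0; A only calls k ≥ 1)
def iter_bitweight (k n : Int) : List Int :=
  if k > 0 then
    gloop ((n - (((1:Int) <<< k.toNat) - 1)).toNat + 1) (((1:Int) <<< k.toNat) - 1) n
  else if n > 0 then [0] else []

-- the 'while 1 << k <= n' loop; fuel n.toNat + 1 covers every iteration (k < 2^k ≤ n)
def ascLoop : Nat → Int → Int → List Int
  | 0, _, _ => []
  | fuel+1, k, n =>
    if ((1:Int) <<< k.toNat) ≤ n then iter_bitweight k n ++ ascLoop fuel (k+1) n else []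

def iter_ascending_bitweight (n : Int) : List Int :=
  if 0 < n then 0 :: ascLoop (n.toNat + 1) 1 n else []

-- ===== PORT B =====
-- Source B: yield from sorted(range(n), key=int.bit_count)
def iter_ascending_bitweight_alt (n : Int) : List Int :=
  PySem.List.sorted (PySem.List.pyRange 0 n) (fun x => PySem.Int.bitCount x)

-- ===== PRECONDITION & SPEC =====
def Spec_iter_ascending_bitweight (n : Int) (out : List Int) : Prop := out = iter_ascending_bitweight_alt n
instance (n : Int) (out : List Int) : Decidable (Spec_iter_ascending_bitweight n out) := by unfold Spec_iter_ascending_bitweight; infer_instance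

-- ===== CLAIM (what is proved, stated in full; the proofs are below) =====
def Claim_equal_iter_ascending_bitweight : Prop := ∀ (n : Int), Dom_iter_ascending_bitweight n → Spec_iter_ascending_bitweight n (iter_ascending_bitweight n)

-- ===== LEMMAS AND PROOFS =====

-- abbreviations used by the proofs only
def bcK (X : Nat) : Nat := PySem.Int.bitCount (X : Int)
-- strict 'sorted by (popcount, value)' order on Int
def lexR (a b : Int) : Prop :=
  PySem.Int.bitCount a < PySem.Int.bitCount b ∨
  (PySem.Int.bitCount a = PySem.Int.bitCount b ∧ a < b)

theorem bcK_zero : bcK 0 = 0 := PySem.Int.bitCount_zero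

theorem bcK_two_mul_add (v e : Nat) (he : e ≤ 1) : bcK (2*v + e) = e + bcK v := by
  rcases Nat.eq_zero_or_pos (2*v + e) with h | h
  · have hv : v = 0 := by omega
    have he0 : e = 0 := by omega
    simp [hv, he0]
  · have h' := PySem.Int.bitCount_natCast (m := 2*v + e) h
    unfold bcK
    rw [h', show (2*v+e) % 2 = e by omega, show (2*v+e) / 2 = v by omega]

theorem bcK_split (u : Nat) : bcK u = u % 2 + bcK (u/2) := by
  calc bcK u = bcK (2*(u/2) + u % 2) := by rw [show 2*(u/2) + u%2 = u by omega]
  _ = u % 2 + bcK (u/2) := bcK_two_mul_add _ _ (by omega)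

theorem bcK_add_pow (t : Nat) : ∀ a u, u < 2^t → bcK (2^t * a + u) = bcK a + bcK u := by
  induction t with
  | zero => intro a u hu; interval_cases u; simp [bcK_zero]
  | succ t ih =>
    intro a u hu
    have hp : 2^(t+1) = 2*2^t := by ring
    have h2 : 2^(t+1)*a + u = 2*(2^t*a + u/2) + u % 2 := by
      calc 2^(t+1)*a + u = 2*(2^t*a) + (2*(u/2)+u%2) := by rw [show 2*(u/2)+u%2 = u by omega]; ring
      _ = 2*(2^t*a + u/2) + u % 2 := by ring
    rw [h2, bcK_two_mul_add _ _ (by omega), ih a (u/2) (by omega), bcK_split u]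
    omega

theorem bcK_pow_sub_one (m : Nat) : bcK (2^m - 1) = m := by
  induction m with
  | zero => simp [bcK_zero]
  | succ m ih =>
    have h0 : 0 < 2^m := Nat.two_pow_pos m
    have hp : 2^(m+1) = 2*2^m := by ring
    rw [show 2^(m+1) - 1 = 2*(2^m - 1) + 1 by omega, bcK_two_mul_add _ _ (by omega), ih]; omega

theorem pow_bcK_le (u : Nat) : 2^(bcK u) - 1 ≤ u := by
  induction u using Nat.strong_induction_on with
  | _ u ih =>
    rcases Nat.eq_zero_or_pos u with h | h
    · simp [h, bcK_zero]
    · have h1 := bcK_split u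
      have h2 := ih (u/2) (by omega)
      rcases Nat.lt_or_ge (u % 2) 1 with h3 | h3
      · rw [show bcK u = bcK (u/2) by omega]; omega
      · rw [show bcK u = bcK (u/2) + 1 by omega, pow_succ]; omega

theorem bcK_le_of_lt_pow (N u : Nat) (h : u < 2^N) : bcK u ≤ N := by
  by_contra hc
  have h1 := pow_bcK_le u
  have h2 : 2^(N+1) ≤ 2^(bcK u) := Nat.pow_le_pow_right (by norm_num) (by omega)
  have h3 : 2^N < 2^(N+1) := Nat.pow_lt_pow_right (by norm_num) (by omega)
  have h4 : (0:Nat) < 2^N := Nat.two_pow_pos N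
  omega

theorem bcK_max (N : Nat) : ∀ u, u < 2^N → u ≤ 2^N - 2^(N - bcK u) := by
  induction N with
  | zero => intro u hu; interval_cases u; simp [bcK_zero]
  | succ N ih =>
    intro u hu
    have hp : 2^(N+1) = 2*2^N := by ring
    have hv : u/2 < 2^N := by omega
    have hkv : bcK (u/2) ≤ N := bcK_le_of_lt_pow N (u/2) hv
    have hih := ih (u/2) hv
    have hsplit := bcK_split u
    have e1 : (0:Nat) < 2^(N - bcK (u/2)) := Nat.two_pow_pos _
    rcases Nat.lt_or_ge (u % 2) 1 with h3 | h3
    · rw [show bcK u = bcK (u/2) by omega,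
        show N + 1 - bcK (u/2) = (N - bcK (u/2)) + 1 by omega, pow_succ]
      omega
    · rw [show bcK u = bcK (u/2) + 1 by omega,
        show N + 1 - (bcK (u/2) + 1) = N - bcK (u/2) by omega]
      have e2 : 2^((N - bcK (u/2)) + 1) = 2^(N - bcK (u/2)) * 2 := pow_succ 2 _
      have e3 : 2^(N - bcK (u/2)) ≤ 2^N := Nat.pow_le_pow_right (by norm_num) (by omega)
      have : N + 1 - bcK (u/2) = (N - bcK (u/2)) + 1 := by omega
      omega

theorem decomp : ∀ X : Nat, 0 < X →
    ∃ t m h, 0 < m ∧ X = 2^(t+m+1)*h + (2^m - 1)*2^t := by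
  intro X
  induction X using Nat.strong_induction_on with
  | _ X ih =>
    intro hX
    rcases Nat.even_or_odd X with he | ho
    · -- X even: decompose X/2 and shift
      obtain ⟨c, hc⟩ := he
      obtain ⟨t, m, h, hm, hY⟩ := ih (X/2) (by omega) (by omega)
      exact ⟨t+1, m, h, hm, by
        rw [show X = 2*(X/2) by omega, hY]; ring⟩
    · -- X odd
      have hX2 : X = 2*(X/2) + 1 := by rcases ho with ⟨c, hc⟩; omega
      rcases Nat.even_or_odd (X/2) with he2 | ho2
      · -- X ≡ 1 mod 4 : t=0, m=1
        refine ⟨0, 1, X/4, by omega, ?_⟩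
        have : X % 4 = 1 := by rcases he2 with ⟨c, hc⟩; omega
        simp; omega
      · -- trailing ones extend
        have hY : 0 < X/2 := by rcases ho2 with ⟨c, hc⟩; omega
        obtain ⟨t, m, h, hm, hdec⟩ := ih (X/2) (by omega) hY
        have ht : t = 0 := by
          by_contra hne
          have : X/2 = 2^(t+m+1)*h + (2^m - 1)*2^t := hdec
          have h2 : 2 ∣ X/2 := by
            have e1 : 2^(t+m+1) = 2*2^(t+m) := by ring
            have e2 : 2^t = 2*2^(t-1) := by
              rw [← pow_succ']; congr 1; omega
            rw [this, e1, e2]; exact ⟨2^(t+m)*h + (2^m-1)*2^(t-1), by ring⟩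
          rcases ho2 with ⟨c, hc⟩; omega
        refine ⟨0, m+1, h, by omega, ?_⟩
        subst ht
        have h1 : 0 < 2^m := Nat.two_pow_pos m
        have e1 : 2^(0+(m+1)+1)*h = 2*(2^(0+m+1)*h) := by ring
        have e2 : (2^(m+1) - 1)*2^0 = 2*((2^m - 1)*2^0) + 1 := by
          have : 2^(m+1) = 2*2^m := by ring
          simp; omega
        rw [e1, e2]
        rw [hdec] at hX2
        omega

theorem odd_and_pred (u : Nat) : (2*u+1) &&& (2*u) = 2*u := by
  apply Nat.eq_of_testBit_eq; intro i
  rw [Nat.testBit_and]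
  cases i with
  | zero => simp [Nat.testBit_zero]
  | succ j => simp [Nat.testBit_add_one, Nat.mul_add_div]

theorem shift_and (t a b c : Nat) (hc : c < 2^t) :
    (2^t*a) &&& (2^t*b + c) = 2^t*(a &&& b) := by
  apply Nat.eq_of_testBit_eq; intro j
  rw [Nat.testBit_and, Nat.testBit_two_pow_mul, Nat.testBit_two_pow_mul,
    Nat.testBit_two_pow_mul_add _ hc]
  by_cases h : j < t
  · simp [h, Nat.not_le.mpr h]
  · simp [h, Nat.not_lt.mp h, Nat.testBit_and]

theorem shift_xor (t a b : Nat) : (2^t*a) ^^^ (2^t*b) = 2^t*(a ^^^ b) := by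
  apply Nat.eq_of_testBit_eq; intro j
  rw [Nat.testBit_xor, Nat.testBit_two_pow_mul, Nat.testBit_two_pow_mul,
    Nat.testBit_two_pow_mul]
  by_cases h : j < t
  · have h' : ¬ t ≤ j := by omega
    simp [h']
  · have h' : t ≤ j := by omega
    simp [h']

theorem or_disjoint (j s a : Nat) (hs : s < 2^j) : s ||| (2^j*a) = 2^j*a + s := by
  apply Nat.eq_of_testBit_eq; intro i
  rw [Nat.testBit_or, Nat.testBit_two_pow_mul,
    show 2^j*a + s = 2^j*a + s from rfl, Nat.testBit_two_pow_mul_add _ hs]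
  by_cases h : i < j
  · simp [h]
  · have : s.testBit i = false :=
      Nat.testBit_eq_false_of_lt (lt_of_lt_of_le hs (Nat.pow_le_pow_right (by norm_num) (by omega)))
    simp [h, this, (by omega : i ≥ j)]

theorem xor_low (m g : Nat) :
    (2^m*(2*g) + (2^m - 1)) ^^^ (2^m*(2*g+1)) = 2^(m+1) - 1 := by
  apply Nat.eq_of_testBit_eq; intro i
  have h1 : (0:Nat) < 2^m := Nat.two_pow_pos m
  rw [Nat.testBit_xor, Nat.testBit_two_pow_mul_add _ (by omega),
    Nat.testBit_two_pow_mul, Nat.testBit_two_pow_sub_one, Nat.testBit_two_pow_sub_one]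
  rcases Nat.lt_trichotomy i m with hi | hi | hi
  · have h2 : ¬ m ≤ i := by omega
    simp [hi, h2, (by omega : i < m + 1)]
  · subst hi
    have h3 : ¬ i < i := by omega
    simp [(by omega : i < i + 1)]
  · have e : (2*g+1).testBit (i - m) = (2*g).testBit (i - m) := by
      rw [show i - m = (i - m - 1) + 1 by omega, Nat.testBit_add_one, Nat.testBit_add_one]
      congr 1; omega
    have h4 : ¬ i < m := by omega
    have h5 : ¬ i ≤ m := by omega
    simp [h4, h5, (by omega : m ≤ i), e]

theorem lowbit (t B : Nat) (hB : B % 2 = 1) :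
    (2^t*B) - ((2^t*B) &&& (2^t*B - 1)) = 2^t := by
  have h1 : (0:Nat) < 2^t := Nat.two_pow_pos t
  have hB1 : 0 < B := by omega
  have e1 : 2^t*B - 1 = 2^t*(B-1) + (2^t - 1) := by
    have : 2^t*B = 2^t*(B-1) + 2^t := by
      rw [Nat.mul_sub, mul_one]
      have : 2^t ≤ 2^t*B := Nat.le_mul_of_pos_right _ hB1
      omega
    omega
  rw [e1, shift_and t B (B-1) (2^t-1) (by omega)]
  obtain ⟨u, hu⟩ : ∃ u, B = 2*u+1 := ⟨B/2, by omega⟩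
  subst hu
  rw [show 2*u+1-1 = 2*u by omega, odd_and_pred]
  have e2 : 2^t*(2*u+1) = 2^t*(2*u) + 2^t := by ring
  omega

theorem div_chain (t m : Nat) (hm : 0 < m) :
    ((2^t*(2^(m+1) - 1)) >>> 2) / 2^t = 2^(m-1) - 1 := by
  have h1 : (0:Nat) < 2^t := Nat.two_pow_pos t
  rw [Nat.shiftRight_eq_div_pow, Nat.div_div_eq_div_mul]
  have e1 : 2^2 * 2^t = 2^t * 4 := by ring
  rw [e1, ← Nat.div_div_eq_div_mul, Nat.mul_div_cancel_left _ h1]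
  have e2 : 2^(m+1) = 4 * 2^(m-1) := by
    rw [show m + 1 = (m-1) + 2 by omega]; ring
  have h2 : (0:Nat) < 2^(m-1) := Nat.two_pow_pos _
  omega

theorem band_pos_neg (X : Nat) (hX : 0 < X) :
    PySem.Int.band (X : Int) (-(X:Int)) = ((X - (X &&& (X-1)) : Nat) : Int) := by
  unfold PySem.Int.band
  rw [if_pos (by positivity), if_neg (by omega)]
  have e1 : ((X:Int)).toNat = X := Int.toNat_natCast X
  have e2 : ((- -(X:Int)) - 1).toNat = X - 1 := by omega
  rw [e1, e2]

theorem gstep_eq (t m h : Nat) (hm : 0 < m) :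
    gstep ((2^(t+m+1)*h + (2^m - 1)*2^t : Nat) : Int)
      = ((2^(t+m+1)*h + 2^(t+m) + (2^(m-1) - 1) : Nat) : Int) := by
  have hpt : (0:Nat) < 2^t := Nat.two_pow_pos t
  have hpm : (0:Nat) < 2^m := Nat.two_pow_pos m
  have hpm1 : (0:Nat) < 2^(m-1) := Nat.two_pow_pos _
  set B := 2^(m+1)*h + (2^m - 1) with hBdef
  have hXB : 2^(t+m+1)*h + (2^m - 1)*2^t = 2^t * B := by
    rw [hBdef, Nat.mul_add, mul_comm (2^m - 1) (2^t)]
    congr 1; ring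
  have e2m : 2^m = 2*2^(m-1) := by rw [← pow_succ']; congr 1; omega
  have hBodd : B % 2 = 1 := by
    have a1 : 2^(m+1)*h = 2*(2^m*h) := by ring
    omega
  have hB0 : 0 < B := by omega
  have hBlow : B = 2^m*(2*h) + (2^m - 1) := by
    rw [hBdef]; congr 1; ring
  have hBsucc : B + 1 = 2^m*(2*h+1) := by
    have e1 : 2^m*(2*h+1) = 2^m*(2*h) + 2^m := by ring
    rw [hBlow, e1]; omega
  have hX0 : 0 < 2^t * B := Nat.mul_pos hpt hB0
  rw [hXB]
  unfold gstep
  simp only []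
  rw [band_pos_neg _ hX0, lowbit t B hBodd]
  have hr : ((2^t*B : Nat) : Int) + ((2^t : Nat) : Int) = ((2^t*(B+1) : Nat) : Int) := by
    push_cast; ring
  rw [hr]
  rw [PySem.Int.bxor_natCast]
  have hxor : (2^t*B) ^^^ (2^t*(B+1)) = 2^t*(2^(m+1) - 1) := by
    rw [shift_xor]
    congr 1
    rw [hBsucc, hBlow]
    exact xor_low m h
  rw [hxor]
  have hshift : (((2^t*(2^(m+1) - 1) : Nat) : Int)) >>> (2:Nat) = (((2^t*(2^(m+1) - 1)) >>> 2 : Nat) : Int) := rfl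
  rw [hshift]
  rw [show (PySem.Int.floordiv (((2^t*(2^(m+1) - 1)) >>> 2 : Nat) : Int) ((2^t : Nat) : Int))
      = ((((2^t*(2^(m+1) - 1)) >>> 2) / 2^t : Nat) : Int) from by
    exact_mod_cast PySem.Int.floordiv_natCast _ _]
  rw [div_chain t m hm]
  rw [PySem.Int.bor_natCast]
  have hfin : (2^(m-1) - 1) ||| (2^t*(B+1)) = 2^(t+m+1)*h + 2^(t+m) + (2^(m-1) - 1) := by
    have e1 : 2^t*(B+1) = 2^(t+m)*(2*h+1) := by rw [hBsucc]; ring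
    have e2 : 2^(m-1) - 1 < 2^(t+m) := by
      have h5 := Nat.pow_le_pow_right (show 1 ≤ 2 by norm_num) (show m-1 ≤ t+m by omega)
      omega
    rw [e1, or_disjoint (t+m) _ (2*h+1) e2]
    have e3 : 2^(t+m)*(2*h+1) = 2^(t+m+1)*h + 2^(t+m) := by ring
    omega
  rw [hfin]

theorem bcK_one : bcK 1 = 1 := by
  have := bcK_split 1
  simp [bcK_zero] at this
  omega

theorem no_skip (t m : Nat) (hm : 0 < m) (u : Nat)
    (h1 : (2^m - 1)*2^t < u) (h2 : u < 2^(t+m) + (2^(m-1) - 1)) : bcK u ≠ m := by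
  intro hk
  have hpt : (0:Nat) < 2^t := Nat.two_pow_pos t
  have hpm1 : (0:Nat) < 2^(m-1) := Nat.two_pow_pos (m-1)
  have etm : 2^(t+m) = 2^m*2^t := by ring
  have esub : (2^m - 1)*2^t = 2^m*2^t - 2^t := by rw [Nat.sub_mul, one_mul]
  rcases Nat.lt_or_ge u (2^(t+m)) with hlt | hge
  · have := bcK_max (t+m) u hlt
    rw [hk, show t + m - m = t by omega] at this
    omega
  · have hm1 : 2^(m-1) - 1 < 2^(t+m) := by
      have := Nat.pow_le_pow_right (show 1 ≤ 2 by norm_num) (show m-1 ≤ t+m by omega)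
      omega
    have hu : u = 2^(t+m)*1 + (u - 2^(t+m)) := by omega
    have hb := bcK_add_pow (t+m) 1 (u - 2^(t+m)) (by omega)
    rw [← hu, bcK_one] at hb
    have hv : bcK (u - 2^(t+m)) = m - 1 := by omega
    have := pow_bcK_le (u - 2^(t+m))
    rw [hv] at this
    omega

theorem gstep_spec (x : Int) (hx : 1 ≤ x) :
    x < gstep x ∧ PySem.Int.bitCount (gstep x) = PySem.Int.bitCount x ∧
      ∀ y : Int, x < y → y < gstep x → PySem.Int.bitCount y ≠ PySem.Int.bitCount x := by
  obtain ⟨t, m, h, hm, hX⟩ := decomp x.toNat (by omega)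
  have hxX : ((x.toNat : Nat) : Int) = x := Int.toNat_of_nonneg (by omega)
  have hpt : (0:Nat) < 2^t := Nat.two_pow_pos t
  have hpm1 : (0:Nat) < 2^(m-1) := Nat.two_pow_pos (m-1)
  have etm : 2^(t+m) = 2^m*2^t := by ring
  have esub : (2^m - 1)*2^t = 2^m*2^t - 2^t := by rw [Nat.sub_mul, one_mul]
  have hm1 : 2^(m-1) - 1 < 2^(t+m) := by
    have := Nat.pow_le_pow_right (show 1 ≤ 2 by norm_num) (show m-1 ≤ t+m by omega)
    omega
  have etm1 : 2^(t+m+1) = 2^(t+m) + 2^(t+m) := by ring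
  have hstep : gstep x = ((2^(t+m+1)*h + 2^(t+m) + (2^(m-1) - 1) : Nat) : Int) := by
    rw [← hxX, hX]; exact gstep_eq t m h hm
  -- popcount of x
  have hux : (2^m - 1)*2^t < 2^(t+m+1) := by omega
  have hbx : PySem.Int.bitCount x = bcK h + m := by
    rw [← hxX, hX]
    show bcK (2^(t+m+1)*h + (2^m - 1)*2^t) = bcK h + m
    rw [bcK_add_pow (t+m+1) h _ hux]
    congr 1
    rw [mul_comm, show (2^t*(2^m - 1) : Nat) = 2^t*(2^m - 1) + 0 by omega,
      bcK_add_pow t _ 0 hpt, bcK_zero, bcK_pow_sub_one]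
    omega
  have hbs : PySem.Int.bitCount (gstep x) = bcK h + m := by
    rw [hstep]
    show bcK (2^(t+m+1)*h + 2^(t+m) + (2^(m-1) - 1)) = bcK h + m
    rw [add_assoc, bcK_add_pow (t+m+1) h _ (by omega)]
    congr 1
    rw [show (2^(t+m) + (2^(m-1) - 1) : Nat) = 2^(t+m)*1 + (2^(m-1) - 1) by omega,
      bcK_add_pow (t+m) 1 _ (by omega), bcK_one, bcK_pow_sub_one]
    omega
  refine ⟨?_, by rw [hbs, hbx], ?_⟩
  · rw [hstep, ← hxX, hX]
    have : (2^m - 1)*2^t < 2^(t+m) + (2^(m-1) - 1) := by omega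
    exact_mod_cast by omega
  · intro y hy1 hy2
    have hy0 : (0:Int) ≤ y := by omega
    have hyY : ((y.toNat : Nat) : Int) = y := Int.toNat_of_nonneg hy0
    rw [← hyY, hbx]
    show bcK y.toNat ≠ bcK h + m
    rw [hstep, ← hyY] at hy2
    rw [← hxX, hX] at hy1
    have hY1 : 2^(t+m+1)*h + (2^m - 1)*2^t < y.toNat := by omega
    have hY2 : y.toNat < 2^(t+m+1)*h + 2^(t+m) + (2^(m-1) - 1) := by omega
    have hdec : y.toNat = 2^(t+m+1)*h + (y.toNat - 2^(t+m+1)*h) := by omega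
    rw [hdec, bcK_add_pow (t+m+1) h _ (by omega)]
    have := no_skip t m hm (y.toNat - 2^(t+m+1)*h) (by omega) (by omega)
    omega

theorem pyRange_nil (a b : Int) (h : b ≤ a) : PySem.List.pyRange a b = [] :=
  List.eq_nil_iff_forall_not_mem.mpr (fun x hx => by
    rw [PySem.List.mem_pyRange_one] at hx; omega)

theorem gloop_nil (fuel : Nat) (x n : Int) (h : ¬ x < n) : gloop fuel x n = [] := by
  cases fuel <;> simp [gloop, h]

theorem gloop_eq : ∀ (fuel : Nat) (x n : Int), 1 ≤ x → (n - x).toNat < fuel →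
    gloop fuel x n
      = (PySem.List.pyRange x n).filter (fun y => decide (PySem.Int.bitCount y = PySem.Int.bitCount x)) := by
  intro fuel
  induction fuel with
  | zero => intro x n hx hf; omega
  | succ fuel ih =>
    intro x n hx hf
    by_cases hxn : x < n
    · obtain ⟨hlt, heq, hmid⟩ := gstep_spec x hx
      rw [show gloop (fuel+1) x n = x :: gloop fuel (gstep x) n by simp [gloop, hxn],
        PySem.List.pyRange_one_cons hxn]
      rw [List.filter_cons_of_pos (by simp)]
      congr 1
      by_cases hgs : gstep x ≤ n
      · rw [PySem.List.pyRange_one_append (x+1) (gstep x) n (by omega) hgs,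
          List.filter_append,
          List.filter_eq_nil_iff.mpr (fun y hy => by
            rw [PySem.List.mem_pyRange_one] at hy
            simp only [decide_eq_true_eq]
            exact hmid y (by omega) (by omega)),
          List.nil_append,
          ih (gstep x) n (by omega) (by omega)]
        apply List.filter_congr
        intro y _
        simp [heq]
      · rw [gloop_nil fuel _ n (by omega)]
        symm
        apply List.filter_eq_nil_iff.mpr
        intro y hy
        rw [PySem.List.mem_pyRange_one] at hy
        simp only [decide_eq_true_eq]
        exact hmid y (by omega) (by omega)
    · rw [gloop_nil _ _ _ hxn, pyRange_nil x n (by omega)]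
      rfl

theorem shl_toNat (k : Int) : (1 : Int) <<< k.toNat - 1 = ((2^k.toNat - 1 : Nat) : Int) := by
  have h1 : (1:Int) <<< k.toNat = ((2^k.toNat : Nat) : Int) := by
    rw [Int.shiftLeft_eq]; push_cast; ring
  have h2 : (0:Nat) < 2^k.toNat := Nat.two_pow_pos _
  omega

theorem iter_bitweight_eq (k n : Int) (hk : 1 ≤ k) :
    iter_bitweight k n
      = (PySem.List.pyRange 0 n).filter (fun y => decide (PySem.Int.bitCount y = k.toNat)) := by
  have h2 : (0:Nat) < 2^k.toNat := Nat.two_pow_pos _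
  have hkk : 1 ≤ k.toNat := by
    have := pow_bcK_le 0
    have h3 : (1:Nat) ≤ 2^k.toNat := by omega
    omega
  have h4 : 2 ≤ 2^k.toNat := by
    calc (2:Nat) = 2^1 := by norm_num
    _ ≤ 2^k.toNat := Nat.pow_le_pow_right (by norm_num) hkk
  have hx0 : (1:Int) <<< k.toNat - 1 = ((2^k.toNat - 1 : Nat) : Int) := shl_toNat k
  have hbc : PySem.Int.bitCount ((2^k.toNat - 1 : Nat) : Int) = k.toNat := bcK_pow_sub_one k.toNat
  have hlow : ∀ y : Int, 0 ≤ y → y < ((2^k.toNat - 1 : Nat) : Int) → PySem.Int.bitCount y ≠ k.toNat := by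
    intro y hy0 hyl hbcy
    have hyY : ((y.toNat : Nat) : Int) = y := Int.toNat_of_nonneg hy0
    rw [← hyY] at hbcy
    have := pow_bcK_le y.toNat
    rw [show bcK y.toNat = k.toNat from hbcy] at this
    omega
  unfold iter_bitweight
  rw [if_pos (by omega), hx0]
  by_cases hle : ((2^k.toNat - 1 : Nat) : Int) ≤ n
  · rw [gloop_eq _ _ _ (by omega) (by omega)]
    simp only [hbc]
    rw [PySem.List.pyRange_one_append 0 ((2^k.toNat - 1 : Nat) : Int) n (by positivity) hle,
      List.filter_append]
    have hnil : List.filter (fun y => decide (PySem.Int.bitCount y = k.toNat))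
        (PySem.List.pyRange 0 ((2^k.toNat - 1 : Nat) : Int)) = [] :=
      List.filter_eq_nil_iff.mpr (fun y hy => by
        rw [PySem.List.mem_pyRange_one] at hy
        simp only [decide_eq_true_eq]
        exact hlow y (by omega) (by omega))
    rw [hnil, List.nil_append]
  · rw [gloop_nil _ _ _ (by omega)]
    symm
    apply List.filter_eq_nil_iff.mpr
    intro y hy
    rw [PySem.List.mem_pyRange_one] at hy
    simp only [decide_eq_true_eq]
    exact hlow y (by omega) (by omega)

theorem bcK_pos (u : Nat) (hu : 0 < u) : 0 < bcK u := by
  induction u using Nat.strong_induction_on with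
  | _ u ih =>
    rcases Nat.lt_or_ge (u % 2) 1 with h | h
    · have := ih (u/2) (by omega) (by omega)
      have hs := bcK_split u
      omega
    · have hs := bcK_split u
      omega

theorem shl_pow (k : Int) : (1:Int) <<< k.toNat = ((2^k.toNat : Nat) : Int) := by
  rw [Int.shiftLeft_eq]; push_cast; ring

theorem mem_iter_bitweight (k n : Int) (hk : 1 ≤ k) (y : Int) :
    y ∈ iter_bitweight k n ↔ (0 ≤ y ∧ y < n ∧ PySem.Int.bitCount y = k.toNat) := by
  rw [iter_bitweight_eq k n hk, List.mem_filter, PySem.List.mem_pyRange_one]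
  simp only [decide_eq_true_eq]
  tauto

theorem ascLoop_mem_fwd (fuel : Nat) : ∀ (k n : Int), 1 ≤ k →
    ∀ y ∈ ascLoop fuel k n, 0 ≤ y ∧ y < n ∧ k.toNat ≤ PySem.Int.bitCount y := by
  induction fuel with
  | zero => intro k n hk y hy; simp [ascLoop] at hy
  | succ fuel ih =>
    intro k n hk y hy
    by_cases hc : ((1:Int) <<< k.toNat) ≤ n
    · rw [show ascLoop (fuel+1) k n = iter_bitweight k n ++ ascLoop fuel (k+1) n by
        simp [ascLoop, hc]] at hy
      rcases List.mem_append.mp hy with h | h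
      · have := (mem_iter_bitweight k n hk y).mp h
        omega
      · have := ih (k+1) n (by omega) y h
        have : (k+1).toNat = k.toNat + 1 := by omega
        omega
    · rw [show ascLoop (fuel+1) k n = [] by simp [ascLoop, hc]] at hy
      simp at hy

theorem ascLoop_mem (fuel : Nat) : ∀ (k n : Int), 1 ≤ k → n.toNat + 1 ≤ fuel + k.toNat →
    ∀ y, y ∈ ascLoop fuel k n ↔ (0 ≤ y ∧ y < n ∧ k.toNat ≤ PySem.Int.bitCount y) := by
  induction fuel with
  | zero =>
    intro k n hk hf y
    simp only [ascLoop, List.not_mem_nil, false_iff]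
    rintro ⟨h0, h1, h2⟩
    have hp := pow_bcK_le y.toNat
    have h3 : 2^(k.toNat) ≤ 2^(bcK y.toNat) := by
      apply Nat.pow_le_pow_right (by norm_num)
      show k.toNat ≤ PySem.Int.bitCount ((y.toNat : Nat) : Int)
      rw [Int.toNat_of_nonneg h0]; exact h2
    have h4 : k.toNat < 2^(k.toNat) := Nat.lt_two_pow_self
    omega
  | succ fuel ih =>
    intro k n hk hf y
    have hp2 : (0:Nat) < 2^k.toNat := Nat.two_pow_pos _
    by_cases hc : ((1:Int) <<< k.toNat) ≤ n
    · rw [show ascLoop (fuel+1) k n = iter_bitweight k n ++ ascLoop fuel (k+1) n by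
        simp [ascLoop, hc]]
      rw [List.mem_append, mem_iter_bitweight k n hk y,
        ih (k+1) n (by omega) (by omega) y]
      have he : (k+1).toNat = k.toNat + 1 := by omega
      rw [he]
      omega
    · rw [show ascLoop (fuel+1) k n = [] by simp [ascLoop, hc]]
      simp only [List.not_mem_nil, false_iff]
      rintro ⟨h0, h1, h2⟩
      rw [shl_pow k] at hc
      have hp := pow_bcK_le y.toNat
      have h3 : 2^(k.toNat) ≤ 2^(bcK y.toNat) := by
        apply Nat.pow_le_pow_right (by norm_num)
        show k.toNat ≤ PySem.Int.bitCount ((y.toNat : Nat) : Int)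
        rw [Int.toNat_of_nonneg h0]; exact h2
      omega

theorem filter_bw_pairwise (n : Int) (w : Nat) :
    ((PySem.List.pyRange 0 n).filter (fun y => decide (PySem.Int.bitCount y = w))).Pairwise lexR := by
  have h1 : ((PySem.List.pyRange 0 n).filter
      (fun y => decide (PySem.Int.bitCount y = w))).Pairwise (· < ·) :=
    (PySem.List.pairwise_lt_pyRange_one 0 n).sublist List.filter_sublist
  apply List.Pairwise.imp_of_mem ?_ h1
  intro a b ha hb hab
  have ha' := (List.mem_filter.mp ha).2
  have hb' := (List.mem_filter.mp hb).2
  simp only [decide_eq_true_eq] at ha' hb'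
  right
  exact ⟨ha'.trans hb'.symm, hab⟩

theorem ascLoop_pairwise (fuel : Nat) : ∀ (k n : Int), 1 ≤ k →
    (ascLoop fuel k n).Pairwise lexR := by
  induction fuel with
  | zero => intro k n hk; simp [ascLoop]
  | succ fuel ih =>
    intro k n hk
    by_cases hc : ((1:Int) <<< k.toNat) ≤ n
    · rw [show ascLoop (fuel+1) k n = iter_bitweight k n ++ ascLoop fuel (k+1) n by
        simp [ascLoop, hc]]
      rw [List.pairwise_append]
      refine ⟨by rw [iter_bitweight_eq k n hk]; exact filter_bw_pairwise n k.toNat,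
        ih (k+1) n (by omega), ?_⟩
      intro a ha b hb
      have h1 := (mem_iter_bitweight k n hk a).mp ha
      have h2 := ascLoop_mem_fwd fuel (k+1) n (by omega) b hb
      left
      omega
    · rw [show ascLoop (fuel+1) k n = [] by simp [ascLoop, hc]]
      simp

theorem A_mem (n : Int) : ∀ y, y ∈ iter_ascending_bitweight n ↔ (0 ≤ y ∧ y < n) := by
  intro y
  unfold iter_ascending_bitweight
  by_cases hn : 0 < n
  · rw [if_pos hn, List.mem_cons, ascLoop_mem (n.toNat+1) 1 n (by omega) (by omega) y]
    constructor
    · rintro (rfl | h) <;> omega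
    · rintro ⟨h0, h1⟩
      by_cases hy0 : y = 0
      · left; exact hy0
      · right
        refine ⟨h0, h1, ?_⟩
        have : 0 < bcK y.toNat := bcK_pos y.toNat (by omega)
        have he : ((y.toNat : Nat) : Int) = y := Int.toNat_of_nonneg h0
        rw [← he]
        show (1:Int).toNat ≤ bcK y.toNat
        omega
  · rw [if_neg hn]
    simp only [List.not_mem_nil, false_iff]
    omega

theorem A_pairwise (n : Int) : (iter_ascending_bitweight n).Pairwise lexR := by
  unfold iter_ascending_bitweight
  by_cases hn : 0 < n
  · rw [if_pos hn, List.pairwise_cons]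
    refine ⟨?_, ascLoop_pairwise _ 1 n (by omega)⟩
    intro y hy
    have h1 := ascLoop_mem_fwd _ 1 n (by omega) y hy
    left
    rw [PySem.Int.bitCount_zero]
    have : (1:Int).toNat = 1 := rfl
    omega
  · rw [if_neg hn]; simp

theorem insertBy_pairwise (x : Int) (ys : List Int)
    (hys : ys.Pairwise lexR) (hlt : ∀ a ∈ ys, a < x) :
    (PySem.List.insertBy (fun a b => decide (PySem.Int.bitCount a < PySem.Int.bitCount b)) x ys).Pairwise lexR := by
  induction ys with
  | nil => simp [PySem.List.insertBy, List.pairwise_cons]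
  | cons y ys ih =>
    rw [show PySem.List.insertBy _ x (y :: ys)
        = if decide (PySem.Int.bitCount x < PySem.Int.bitCount y) then x :: y :: ys
          else y :: PySem.List.insertBy _ x ys from rfl]
    rw [List.pairwise_cons] at hys
    split
    · rename_i hxy
      simp only [decide_eq_true_eq] at hxy
      rw [List.pairwise_cons]
      refine ⟨?_, List.pairwise_cons.mpr hys⟩
      intro z hz
      rcases List.mem_cons.mp hz with rfl | hz'
      · left; exact hxy
      · have h2 := hys.1 z hz'
        unfold lexR at h2
        left
        omega
    · rename_i hxy
      simp only [decide_eq_true_eq, Nat.not_lt] at hxy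
      rw [List.pairwise_cons]
      refine ⟨?_, ih hys.2 (fun a ha => hlt a (List.mem_cons_of_mem y ha))⟩
      intro z hz
      rcases (PySem.List.mem_insertBy _ x z ys).mp hz with h | hz'
      · -- lexR y x
        have hyx : y < x := hlt y (by simp)
        unfold lexR
        subst h
        omega
      · exact hys.1 z hz'

theorem foldl_insert_pairwise (xs : List Int) : ∀ (acc : List Int),
    xs.Pairwise (· < ·) → acc.Pairwise lexR → (∀ a ∈ acc, ∀ b ∈ xs, a < b) →
    (xs.foldl (fun acc x => PySem.List.insertBy (fun a b => decide (PySem.Int.bitCount a < PySem.Int.bitCount b)) x acc) acc).Pairwise lexR := by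
  induction xs with
  | nil => intro acc _ h _; exact h
  | cons x xs ih =>
    intro acc hxs hacc hcross
    rw [List.pairwise_cons] at hxs
    simp only [List.foldl_cons]
    apply ih _ hxs.2
    · exact insertBy_pairwise x acc hacc
        (fun a ha => hcross a ha x (by simp))
    · intro a ha b hb
      rcases (PySem.List.mem_insertBy _ x a acc).mp ha with rfl | ha'
      · exact hxs.1 b hb
      · exact hcross a ha' b (List.mem_cons_of_mem x hb)

theorem B_pairwise (n : Int) : (iter_ascending_bitweight_alt n).Pairwise lexR := by
  unfold iter_ascending_bitweight_alt
  rw [PySem.List.sorted_eq_foldl_insertBy]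
  exact foldl_insert_pairwise _ [] (PySem.List.pairwise_lt_pyRange_one 0 n)
    (List.Pairwise.nil) (by simp)

-- ---- assembly ----
theorem lexR_antisymm (a b : Int) : lexR a b → lexR b a → a = b := by
  unfold lexR; omega

theorem lexR_ne (a b : Int) : lexR a b → a ≠ b := by
  unfold lexR; rintro h rfl; omega

theorem pairwise_nodup {l : List Int} (h : l.Pairwise lexR) : l.Nodup :=
  h.imp (fun hab => lexR_ne _ _ hab)

-- ===== VERDICT (by name: the statement is the Claim_ definition above) =====
theorem iter_ascending_bitweight_spec : Claim_equal_iter_ascending_bitweight := by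
  intro n _
  unfold Spec_iter_ascending_bitweight
  apply List.Perm.eq_of_pairwise (le := lexR)
    (fun a b _ _ h h' => lexR_antisymm a b h h') (A_pairwise n) (B_pairwise n)
  have hB : (iter_ascending_bitweight_alt n).Perm (PySem.List.pyRange 0 n) :=
    PySem.List.sorted_perm _ _ _
  refine ((List.perm_ext_iff_of_nodup (pairwise_nodup (A_pairwise n)) ?_).mpr ?_).trans hB.symm
  · exact (PySem.List.pairwise_lt_pyRange_one 0 n).imp (fun h => by omega)
  · intro a
    rw [A_mem n a, PySem.List.mem_pyRange_one]
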